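-- pv_equiv track=rewrite | github.com/radiradev/anemoi-core | training/src/anemoi/training/data/refactor/path_keys.py | encode_path_if_needed
-- ===== SOURCE A (Python) =====
-- SEPARATOR = "__"
--
-- _MAPPING_OF_ALLOWED_CHARACTERS_IN_DICT_KEYS = {
--     # "Xbackslash_": "\\",
--     # "Xbar_": "|",
--     "Xcolon_": ":",
--     # "Xequal_": "=",
--     "Xgreater_": "<",
--     "Xless_": ">",
--     "Xminus_": "-",
--     "Xplus_": "+",
--     # "Xquestion_": "?",
--     # "Xslash_": "/",
--     "Xstar_": "*",
--     # "Xtilde_": "~",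
-- }
--
-- _ALLOWED_CHARACTERS_IN_DICT_KEYS = set(_MAPPING_OF_ALLOWED_CHARACTERS_IN_DICT_KEYS.values())
--
-- def is_encoded(path):
--     if not isinstance(path, str):
--         raise TypeError(f"Expected string for path, got {type(path)}: {path}")
--     if "." in path:  # Found dot, this only happens in human readable paths
--         return False
--     if any(c.isupper() for c in path):  # there is a capital letter, this only happens in encoded paths
--         return False
--     if any(c in _ALLOWED_CHARACTERS_IN_DICT_KEYS for c in path):
--         return False
--     return True
--
-- def encode_path_if_needed(path):
--     if isinstance(path, (list, tuple)):
--         assert False, "Should not happen anymore"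
--         return SEPARATOR.join(encode_path_if_needed(x) for x in path)
--
--     if is_encoded(path):
--         return path
--
--     if path.startswith("."):
--         raise KeyError(f"Path starting with {SEPARATOR} is not allowed. Got {path}")
--
--     # here we may want to have some generic handling of special characters
--     # but for now we only handle the ones in MAPPING_OF_ALLOWED_CHARACTERS_IN
--     for k, v in _MAPPING_OF_ALLOWED_CHARACTERS_IN_DICT_KEYS.items():
--         if v in path:
--             path = path.replace(v, k)
--
--     path = path.replace(".", SEPARATOR)
--     check_encoded_path(path)
--     return path
--
-- def check_encoded_path(path):
--     def _check_encoded_character(c, path):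
--         if c.islower():
--             return
--         if c.isdigit():
--             return
--         if c in ["_", "X"]:
--             return
--         raise KeyError(f"Cannot contain '{c}', got {path}")
--
--     for c in path:
--         _check_encoded_character(c, path)
--
--     if "___" in path:
--         raise KeyError(f"Cannot contain '___' sequence, got {path}")
-- ===== SOURCE B (Python) =====
-- SEPARATOR = "__"
--
-- _MAPPING_OF_ALLOWED_CHARACTERS_IN_DICT_KEYS = {
--     "Xcolon_": ":",
--     "Xgreater_": "<",
--     "Xless_": ">",
--     "Xminus_": "-",
--     "Xplus_": "+",
--     "Xstar_": "*",
-- }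
--
-- _ALLOWED_CHARACTERS_IN_DICT_KEYS = set(_MAPPING_OF_ALLOWED_CHARACTERS_IN_DICT_KEYS.values())
--
--
-- def is_encoded(path):
--     if not isinstance(path, str):
--         raise TypeError(f"Expected string for path, got {type(path)}: {path}")
--     if "." in path:
--         return False
--     if any(c.isupper() for c in path):
--         return False
--     if any(c in _ALLOWED_CHARACTERS_IN_DICT_KEYS for c in path):
--         return False
--     return True
--
--
-- def _encode_char(c):
--     if c == ".":
--         return SEPARATOR
--     if c == ":":
--         return "Xcolon_"
--     if c == "<":
--         return "Xgreater_"
--     if c == ">":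
--         return "Xless_"
--     if c == "-":
--         return "Xminus_"
--     if c == "+":
--         return "Xplus_"
--     if c == "*":
--         return "Xstar_"
--     return c
--
--
-- def encode_path_if_needed(path):
--     if is_encoded(path):
--         return path
--
--     if path.startswith("."):
--         raise KeyError(f"Path starting with {SEPARATOR} is not allowed. Got {path}")
--
--     # single table-driven pass instead of repeated whole-string replace passes
--     out = "".join(_encode_char(c) for c in path)
--
--     for c in out:
--         if not (c.islower() or c.isdigit() or c in ("_", "X")):
--             raise KeyError(f"Cannot contain '{c}', got {out}")
--     if "___" in out:
--         raise KeyError(f"Cannot contain '___' sequence, got {out}")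
--     return out
-- ===== Notes on version B (the rewrite author's own statement) =====
-- stated objective: alternative
-- what changed: A rewrites the whole string once per special character with guarded str.replace passes plus a final '.'->'__' replace; B makes a single table-driven pass over the characters, emitting each char's encoding and joining once.
import Mathlib
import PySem

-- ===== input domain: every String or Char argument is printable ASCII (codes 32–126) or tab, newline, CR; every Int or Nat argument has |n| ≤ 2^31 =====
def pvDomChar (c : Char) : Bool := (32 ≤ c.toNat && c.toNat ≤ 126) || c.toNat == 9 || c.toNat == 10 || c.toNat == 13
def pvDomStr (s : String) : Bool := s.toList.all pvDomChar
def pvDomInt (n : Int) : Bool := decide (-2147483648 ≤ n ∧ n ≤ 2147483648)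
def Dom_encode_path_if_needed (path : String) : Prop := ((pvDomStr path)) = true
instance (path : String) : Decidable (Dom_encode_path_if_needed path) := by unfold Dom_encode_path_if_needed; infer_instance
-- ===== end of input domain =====

-- B replaces A's sequence of whole-string `.replace` passes by a single table-driven
-- per-character pass; same return value, same raising behaviour (return value proved here).

-- ===== PORT A =====
-- _ALLOWED_CHARACTERS_IN_DICT_KEYS (the set of the mapping's values)
def pvAllowedSet : PySem.Set Char := PySem.Set.ofList [':', '<', '>', '-', '+', '*']

-- _MAPPING_OF_ALLOWED_CHARACTERS_IN_DICT_KEYS.items() in insertion order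
def pvMapping : List (String × String) :=
  [("Xcolon_", ":"), ("Xgreater_", "<"), ("Xless_", ">"),
   ("Xminus_", "-"), ("Xplus_", "+"), ("Xstar_", "*")]

def is_encoded (path : String) : Bool :=
  if PySem.Str.isIn "." path then false
  else if path.toList.any (fun c => PySem.Chars.isupper c) then false
  else if path.toList.any (fun c => PySem.Set.contains pvAllowedSet c) then false
  else true

-- the `path.startswith(".")` guard and `check_encoded_path` only RAISE; those inputs
-- are excluded by Pre_, so the port returns the built string.
def encode_path_if_needed (path : String) : String :=
  if is_encoded path then path
  else
    let p := pvMapping.foldl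
      (fun p kv => if PySem.Str.isIn kv.2 p then PySem.Str.replace p kv.2 kv.1 else p) path
    PySem.Str.replace p "." "__"

-- ===== PORT B =====
def pvEncChar (c : Char) : String :=
  if c = '.' then "__"
  else if c = ':' then "Xcolon_"
  else if c = '<' then "Xgreater_"
  else if c = '>' then "Xless_"
  else if c = '-' then "Xminus_"
  else if c = '+' then "Xplus_"
  else if c = '*' then "Xstar_"
  else String.ofList [c]

-- Source B's validation loop only RAISES (excluded by Pre_); the value returned is the join.
def encode_path_if_needed_alt (path : String) : String :=
  if is_encoded path then path
  else PySem.Str.join "" (path.toList.map pvEncChar)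

-- ===== PRECONDITION & SPEC =====
def pvSpecialChar (c : Char) : Bool := c == ':' || c == '<' || c == '>' || c == '-' || c == '+' || c == '*'
-- chars on which A's is_encoded short-circuit fires nowhere
def pvPlainChar (c : Char) : Bool := !(c == '.') && !(PySem.Chars.isupper c) && !(pvSpecialChar c)
-- chars the final check_encoded_path accepts (directly or via their encoding)
def pvOkChar (c : Char) : Bool :=
  PySem.Chars.islower c || PySem.Chars.isdigit c || c == '_' || c == 'X' || c == '.' || pvSpecialChar c
-- chars whose encoding ends with '_'
def pvEndsU (c : Char) : Bool := pvSpecialChar c || c == '_' || c == '.'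
-- the input patterns whose encoding contains "___"
def pvTripleU : List Char → Bool
  | a :: b :: rest =>
      (b == '.' && pvEndsU a) || (a == '.' && b == '_') ||
      (match rest with | c :: _ => pvEndsU a && b == '_' && c == '_' | [] => false) ||
      pvTripleU (b :: rest)
  | _ => false

-- Pre_ = exactly the inputs where Python A returns (no KeyError): either the string is
-- already "encoded" (no dot/uppercase/special char), or it does not start with '.',
-- every char survives check_encoded_path, and no pattern encoding to "___" occurs.
def Pre_encode_path_if_needed (path : String) : Prop :=
  path.toList.all pvPlainChar = true ∨
    (path.toList.head? ≠ some '.' ∧ path.toList.all pvOkChar = true ∧ pvTripleU path.toList = false)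
instance (path : String) : Decidable (Pre_encode_path_if_needed path) := by
  unfold Pre_encode_path_if_needed; infer_instance

def pvWitness_encode_path_if_needed : String := "a.b-c"

def Spec_encode_path_if_needed (path : String) (out : String) : Prop := out = encode_path_if_needed_alt path
instance (path : String) (out : String) : Decidable (Spec_encode_path_if_needed path out) := by
  unfold Spec_encode_path_if_needed; infer_instance

-- ===== CLAIM (what is proved, stated in full; the proofs are below) =====
def Claim_equal_encode_path_if_needed : Prop := ∀ (path : String), Dom_encode_path_if_needed path → Pre_encode_path_if_needed path → Spec_encode_path_if_needed path (encode_path_if_needed path)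

-- ===== LEMMAS AND PROOFS =====

-- replace.go with a single-char pattern and enough fuel is the per-char flatMap
theorem pv_go_single (t : Char) (img : List Char) :
    ∀ (l acc : List Char) (fuel : Nat), l.length ≤ fuel →
      PySem.Chars.replace.go [t] img fuel l acc
        = acc.reverse ++ l.flatMap (fun c => if c = t then img else [c]) := by
  intro l
  induction l with
  | nil =>
      intro acc fuel _
      cases fuel <;> rw [PySem.Chars.replace.go.eq_def] <;> simp
  | cons c l ih =>
      intro acc fuel hf
      cases fuel with
      | zero => simp at hf
      | succ n =>
          rw [PySem.Chars.replace.go.eq_def]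
          simp only [List.isPrefixOf, List.length_cons] at *
          by_cases hc : t = c
          · subst hc
            simp only [beq_self_eq_true, Bool.true_and, if_pos,
              List.length_nil, Nat.zero_add, List.drop_succ_cons, List.drop_zero]
            rw [ih _ n (by omega)]
            simp
          · have hb : (t == c) = false := beq_eq_false_iff_ne.mpr hc
            simp only [hb, Bool.false_and, Bool.false_eq_true, if_false]
            rw [ih _ n (by omega)]
            have hct : c ≠ t := fun h => hc h.symm
            simp [hct]

theorem pv_replace_single (t : Char) (img l : List Char) :
    PySem.Chars.replace l [t] img = l.flatMap (fun c => if c = t then img else [c]) := by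
  unfold PySem.Chars.replace
  simpa using pv_go_single t img l [] l.length (le_refl _)

theorem pv_flatMap_id_of_not_mem (t : Char) (img : List Char) (l : List Char) (h : t ∉ l) :
    l.flatMap (fun c => if c = t then img else [c]) = l := by
  induction l with
  | nil => simp
  | cons c l ih =>
      simp only [List.mem_cons, not_or] at h
      rw [List.flatMap_cons, if_neg (fun hh => h.1 hh.symm), ih h.2]
      simp

-- the guarded String-level replace step, as a per-char flatMap on toList
theorem pv_step_str (tc : Char) (t img p : String) (ht : t.toList = [tc]) :
    (if PySem.Str.isIn t p then PySem.Str.replace p t img else p).toList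
      = p.toList.flatMap (fun c => if c = tc then img.toList else [c]) := by
  split_ifs with h
  · rw [PySem.Str.toList_replace, ht, pv_replace_single]
  · have h' : PySem.Chars.isIn [tc] p.toList = false := by
      rw [← ht, ← PySem.Str.isIn_eq]
      exact Bool.eq_false_iff.mpr h
    have hnm : tc ∉ p.toList := by
      intro hm
      obtain ⟨s1, s2, hps⟩ := List.append_of_mem hm
      have : [tc] <:+: p.toList := by rw [hps]; exact ⟨s1, s2, by simp⟩
      exact (PySem.Chars.isIn_eq_false_iff _ _).mp h' this
    rw [pv_flatMap_id_of_not_mem tc img.toList _ hnm]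

-- the composed per-char action of A's seven passes equals B's table
theorem pv_pointwise (c : Char) :
    ((((((((if c = ':' then "Xcolon_".toList else [c]).flatMap
      (fun c => if c = '<' then "Xgreater_".toList else [c])).flatMap
      (fun c => if c = '>' then "Xless_".toList else [c])).flatMap
      (fun c => if c = '-' then "Xminus_".toList else [c])).flatMap
      (fun c => if c = '+' then "Xplus_".toList else [c])).flatMap
      (fun c => if c = '*' then "Xstar_".toList else [c])).flatMap
      (fun c => if c = '.' then "__".toList else [c])))
      = (pvEncChar c).toList := by
  by_cases h1 : c = ':'; · subst h1; decide
  by_cases h2 : c = '<'; · subst h2; decide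
  by_cases h3 : c = '>'; · subst h3; decide
  by_cases h4 : c = '-'; · subst h4; decide
  by_cases h5 : c = '+'; · subst h5; decide
  by_cases h6 : c = '*'; · subst h6; decide
  by_cases h7 : c = '.'; · subst h7; decide
  simp [pvEncChar, h1, h2, h3, h4, h5, h6, h7]

theorem pv_flatten_intersperse_nil (L : List (List Char)) :
    (List.intersperse ([] : List Char) L).flatten = L.flatten := by
  induction L with
  | nil => simp
  | cons x L ih =>
      cases L with
      | nil => simp
      | cons y M =>
          have hstep : List.intersperse ([] : List Char) (x :: y :: M)
              = x :: [] :: List.intersperse [] (y :: M) := by simp [List.intersperse]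
          rw [hstep]
          simp only [List.flatten_cons, List.nil_append]
          rw [ih]
          simp

theorem pv_join_toList (l : List Char) :
    (PySem.Str.join "" (l.map pvEncChar)).toList = l.flatMap (fun c => (pvEncChar c).toList) := by
  rw [PySem.Str.toList_join]
  show PySem.Chars.join [] _ = _
  unfold PySem.Chars.join
  simp [List.intercalate, pv_flatten_intersperse_nil, List.flatMap_def, List.map_map, Function.comp_def]

-- ===== VERDICT (by name: the statement is the Claim_ definition above) =====
theorem encode_path_if_needed_spec : Claim_equal_encode_path_if_needed := by
  intro path _ _
  unfold Spec_encode_path_if_needed encode_path_if_needed encode_path_if_needed_alt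
  by_cases h : is_encoded path
  · simp [h]
  · simp only [h, if_neg, Bool.false_eq_true, not_false_iff]
    apply String.toList_inj.mp
    rw [pv_join_toList]
    simp only [pvMapping, List.foldl_cons, List.foldl_nil]
    rw [PySem.Str.toList_replace]
    have hdot : (".".toList : List Char) = ['.'] := by decide
    have hsep : ("__".toList : List Char) = ['_','_'] := by decide
    rw [hdot, hsep, pv_replace_single]
    rw [pv_step_str '*' _ _ _ (by decide)]
    rw [pv_step_str '+' _ _ _ (by decide)]
    rw [pv_step_str '-' _ _ _ (by decide)]
    rw [pv_step_str '>' _ _ _ (by decide)]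
    rw [pv_step_str '<' _ _ _ (by decide)]
    rw [pv_step_str ':' _ _ _ (by decide)]
    simp only [List.flatMap_assoc]
    apply List.flatMap_congr
    intro c _
    have := pv_pointwise c
    simpa [List.flatMap_assoc] using this
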